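-- pv_equiv track=rewrite | github.com/Ollson2921/cperms_ins_enc | cperms_ins_enc/check_regular/check_regular_hori.py | dec_left
-- ===== SOURCE A (Python) =====
-- def is_increasing(cperm: list[int], vals_seen=set()) -> bool:
--     """Returns True if the sequence is strictly increasing.
--     Also checks that no vals in vals_seen occur in the sequence."""
--     if cperm[0] in vals_seen:
--         return False
--     if len(cperm) == 0:
--         return True
--     left = cperm[0]
--     for idx in range(1, len(cperm)):
--         if left >= cperm[idx]:
--             return False
--         if cperm[idx] in vals_seen:
--             return False
--         left = cperm[idx]
--     return True
--
-- def is_decreasing(cperm: list[int], vals_seen=set()) -> bool: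
--     """Returns True if the sequence is strictly decreasing.
--     Also checks that no vals in vals_seen occur in the sequence."""
--     if cperm[0] in vals_seen:
--         return False
--     if len(cperm) == 0 and cperm[0] not in vals_seen:
--         return True
--     left = cperm[0]
--     for idx in range(1, len(cperm)):
--         if left <= cperm[idx]:
--             return False
--         if cperm[idx] in vals_seen:
--             return False
--         left = cperm[idx]
--     return True
--
-- def is_constant(cperm: list[int], vals_seen=set()) -> bool:
--     """Returns True if the sequence is constant.
--     Also checks that no vals in vals_seen occur in the sequence."""
--     if cperm[0] in vals_seen:
--         return False
--     if len(cperm) == 0 and cperm[0] not in vals_seen: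
--         return True
--     left = cperm[0]
--     for idx in range(1, len(cperm)):
--         if left != cperm[idx]:
--             return False
--         if cperm[idx] in vals_seen:
--             return False
--     return True
--
-- def seq_type(cperm: list[int], seqtype: int, vals_seen=set()) -> bool:
--     """Returns True if the sequence is of the type specified by the
--     integer.
--     0 -> strictly decreasing
--     1 -> strictly increasing
--     2 -> constant.
--     Also checks that no vals in vals_seen occur in the sequence."""
--     if seqtype == 0:
--         return is_decreasing(cperm, vals_seen)
--     elif seqtype == 1:
--         return is_increasing(cperm, vals_seen)
--     elif seqtype == 2:
--         return is_constant(cperm, vals_seen)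
--     else:
--         raise ValueError("Type must be 0, 1, or 2.")
--
-- def dec_left(cperm: list[int], seqtype: int) -> bool:
--     """Returns True if the left part of the sequence is strictly
--     increasing and right is of type 'seqtype'.
--     0 -> strictly decreasing
--     1 -> strictly increasing"""
--     left = cperm[0]
--     vals_seen = set([left])
--     for idx in range(1, len(cperm)):
--         if left <= cperm[idx]:
--             break
--         left = cperm[idx]
--         vals_seen.add(left)
--     else:
--         return True
--     return seq_type(cperm[idx:], seqtype, vals_seen)
-- ===== SOURCE B (Python) =====
-- def dec_left(cperm, seqtype):
--     n = len(cperm)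
--     i = next((k + 1 for k, (a, b) in enumerate(zip(cperm, cperm[1:])) if a <= b), n)
--     if i == n:
--         return True
--     if seqtype not in (0, 1, 2):
--         raise ValueError("Type must be 0, 1, or 2.")
--     suffix = cperm[i:]
--     if seqtype == 2:
--         mono = suffix.count(suffix[0]) == len(suffix)
--         needed = i + 1
--     else:
--         mono = all((a > b) if seqtype == 0 else (a < b)
--                    for a, b in zip(suffix, suffix[1:]))
--         needed = n
--     return mono and len(set(cperm)) == needed
-- ===== Notes on version B (the rewrite author's own statement) =====
-- stated objective: alternative
-- what changed: B drops A's vals_seen set and per-element membership scan entirely: after locating the split it checks the suffix's shape (adjacent comparisons, or a count for the constant case) and verifies prefix/suffix disjointness by a single global distinct-value count, len(set(cperm)) == n (or == i+1 for the constant case).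
import Mathlib
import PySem

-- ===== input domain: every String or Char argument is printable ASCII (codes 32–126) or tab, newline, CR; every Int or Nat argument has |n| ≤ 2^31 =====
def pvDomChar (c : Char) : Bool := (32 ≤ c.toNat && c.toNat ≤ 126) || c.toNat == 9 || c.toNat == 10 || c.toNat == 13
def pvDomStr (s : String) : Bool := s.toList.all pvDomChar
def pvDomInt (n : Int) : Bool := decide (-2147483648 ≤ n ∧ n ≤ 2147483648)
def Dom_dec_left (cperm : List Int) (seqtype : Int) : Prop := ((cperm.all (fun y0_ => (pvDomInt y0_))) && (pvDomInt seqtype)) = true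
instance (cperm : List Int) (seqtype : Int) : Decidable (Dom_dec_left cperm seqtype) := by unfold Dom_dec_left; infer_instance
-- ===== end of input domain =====

-- B drops A's vals_seen set and disjointness scan altogether: it checks the suffix's shape and then
-- verifies prefix/suffix disjointness by a single global distinct-value COUNT (len(set(cperm)) equals
-- the count forced by the shapes); objective: alternative (a cardinality argument replaces the set-membership passes).

-- ===== PORT A =====
-- is_decreasing's loop over range(1, len(cperm)): state = left, walked over the tail
def pvDecLoop (vals_seen : PySem.Set Int) (left : Int) : List Int → Bool
  | [] => true
  | x :: xs =>
    if left ≤ x then false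
    else if PySem.Set.contains vals_seen x then false
    else pvDecLoop vals_seen x xs

def is_decreasing (cperm : List Int) (vals_seen : PySem.Set Int) : Bool :=
  match cperm with
  | [] => false  -- cperm[0] raises IndexError; never reached from dec_left
  | left :: rest =>
    if PySem.Set.contains vals_seen left then false
    else pvDecLoop vals_seen left rest

def pvIncLoop (vals_seen : PySem.Set Int) (left : Int) : List Int → Bool
  | [] => true
  | x :: xs =>
    if x ≤ left then false
    else if PySem.Set.contains vals_seen x then false
    else pvIncLoop vals_seen x xs

def is_increasing (cperm : List Int) (vals_seen : PySem.Set Int) : Bool :=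
  match cperm with
  | [] => false  -- cperm[0] raises IndexError; never reached from dec_left
  | left :: rest =>
    if PySem.Set.contains vals_seen left then false
    else pvIncLoop vals_seen left rest

-- is_constant: left is never updated in the Python loop
def pvConstLoop (vals_seen : PySem.Set Int) (left : Int) : List Int → Bool
  | [] => true
  | x :: xs =>
    if left ≠ x then false
    else if PySem.Set.contains vals_seen x then false
    else pvConstLoop vals_seen left xs

def is_constant (cperm : List Int) (vals_seen : PySem.Set Int) : Bool :=
  match cperm with
  | [] => false  -- cperm[0] raises IndexError; never reached from dec_left
  | left :: rest =>
    if PySem.Set.contains vals_seen left then false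
    else pvConstLoop vals_seen left rest

def seq_type (cperm : List Int) (seqtype : Int) (vals_seen : PySem.Set Int) : Bool :=
  if seqtype = 0 then is_decreasing cperm vals_seen
  else if seqtype = 1 then is_increasing cperm vals_seen
  else if seqtype = 2 then is_constant cperm vals_seen
  else false  -- raise ValueError; excluded by Pre_

-- dec_left's loop: break gives cperm[idx:] = x :: xs; for-else returns True
def pvDecLeftLoop (seqtype : Int) (vals_seen : PySem.Set Int) (left : Int) : List Int → Bool
  | [] => true
  | x :: xs =>
    if left ≤ x then seq_type (x :: xs) seqtype vals_seen
    else pvDecLeftLoop seqtype (PySem.Set.add vals_seen x) x xs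

def dec_left (cperm : List Int) (seqtype : Int) : Bool :=
  match cperm with
  | [] => false  -- cperm[0] raises IndexError; excluded by Pre_
  | left :: rest => pvDecLeftLoop seqtype (PySem.Set.ofList [left]) left rest

-- ===== PORT B =====
-- Source B's 'next((k+1 for k, (a,b) in enumerate(zip(cperm, cperm[1:])) if a <= b), n)'
def pvSplitLoop (k : Nat) : List (Int × Int) → Option Nat
  | [] => none
  | (a, b) :: rest => if a ≤ b then some (k + 1) else pvSplitLoop (k + 1) rest

def pvSplitPoint (cperm : List Int) : Nat :=
  match pvSplitLoop 0 (cperm.zip cperm.tail) with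
  | some i => i
  | none => cperm.length

def dec_left_alt (cperm : List Int) (seqtype : Int) : Bool :=
  let n := cperm.length
  let i := pvSplitPoint cperm
  if i = n then true
  else if !(seqtype == 0 || seqtype == 1 || seqtype == 2) then false  -- raise ValueError; excluded by Pre_
  else
    let suffix := cperm.drop i
    -- (mono, needed) per branch; suffix[0] is total here since i < n
    let mn :=
      if seqtype = 2 then
        (decide (PySem.List.count suffix (suffix.headD 0) = suffix.length), i + 1)
      else
        ((suffix.zip suffix.tail).all
          (fun p => if seqtype = 0 then decide (p.2 < p.1) else decide (p.1 < p.2)), n)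
    mn.1 && decide (PySem.Set.len (PySem.Set.ofList cperm) = (mn.2 : Int))

-- ===== PRECONDITION & SPEC =====
-- Pre_ excludes exactly the inputs on which A raises: empty cperm (IndexError on cperm[0]) and
-- inputs whose strictly-decreasing prefix breaks while seqtype is not 0/1/2 (ValueError in seq_type;
-- a fully strictly-decreasing cperm returns True before seqtype is ever inspected).
def Pre_dec_left (cperm : List Int) (seqtype : Int) : Prop :=
  cperm ≠ [] ∧ (seqtype = 0 ∨ seqtype = 1 ∨ seqtype = 2 ∨
    ((cperm.zip cperm.tail).all (fun p => decide (p.2 < p.1)) = true))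
instance (cperm : List Int) (seqtype : Int) : Decidable (Pre_dec_left cperm seqtype) := by
  unfold Pre_dec_left; infer_instance

def pvWitness_dec_left : List Int × Int := ([3, 1, 2, 2], 2)

def Spec_dec_left (cperm : List Int) (seqtype : Int) (out : Bool) : Prop := out = dec_left_alt cperm seqtype
instance (cperm : List Int) (seqtype : Int) (out : Bool) : Decidable (Spec_dec_left cperm seqtype out) := by unfold Spec_dec_left; infer_instance

-- ===== CLAIM (what is proved, stated in full; the proofs are below) =====
def Claim_equal_dec_left : Prop := ∀ (cperm : List Int) (seqtype : Int), Dom_dec_left cperm seqtype → Pre_dec_left cperm seqtype → Spec_dec_left cperm seqtype (dec_left cperm seqtype)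

-- ===== LEMMAS AND PROOFS =====

-- split-point arithmetic
theorem pvSplitLoop_succ (ps : List (Int × Int)) : ∀ k, pvSplitLoop (k + 1) ps = (pvSplitLoop k ps).map (· + 1) := by
  induction ps with
  | nil => intro k; rfl
  | cons p rest ih =>
    intro k
    obtain ⟨a, b⟩ := p
    simp only [pvSplitLoop]
    split_ifs with h
    · rfl
    · exact ih (k + 1)

theorem pvSplitPoint_single (a : Int) : pvSplitPoint [a] = 1 := rfl

theorem pvSplitPoint_cons_le {a b : Int} (t : List Int) (h : a ≤ b) :
    pvSplitPoint (a :: b :: t) = 1 := by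
  simp [pvSplitPoint, pvSplitLoop, h]

theorem pvSplitPoint_cons_gt {a b : Int} (t : List Int) (h : ¬ a ≤ b) :
    pvSplitPoint (a :: b :: t) = pvSplitPoint (b :: t) + 1 := by
  simp only [pvSplitPoint, List.zip_cons_cons, List.tail_cons, pvSplitLoop, h, if_false,
    pvSplitLoop_succ]
  cases hs : pvSplitLoop 0 ((b :: t).zip t) with
  | none => simp [List.length]
  | some j => simp

theorem pvSplitPoint_pos : ∀ (t : List Int) (a : Int), 1 ≤ pvSplitPoint (a :: t) := by
  intro t
  induction t with
  | nil => intro a; simp [pvSplitPoint_single]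
  | cons b t ih =>
    intro a
    by_cases h : a ≤ b
    · simp [pvSplitPoint_cons_le t h]
    · simp [pvSplitPoint_cons_gt t h]

theorem pvSplitPoint_le_len : ∀ (t : List Int) (a : Int), pvSplitPoint (a :: t) ≤ t.length + 1 := by
  intro t
  induction t with
  | nil => intro a; simp [pvSplitPoint_single]
  | cons b t ih =>
    intro a
    by_cases h : a ≤ b
    · simp [pvSplitPoint_cons_le t h]
    · have := ih b
      simp only [pvSplitPoint_cons_gt t h, List.length_cons]
      omega

theorem pvSplitPoint_of_chain : ∀ (t : List Int) (a : Int),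
    ((a :: t).zip t).all (fun p => decide (p.2 < p.1)) = true → pvSplitPoint (a :: t) = t.length + 1 := by
  intro t
  induction t with
  | nil => intro a _; simp [pvSplitPoint_single]
  | cons b t ih =>
    intro a hc
    simp only [List.zip_cons_cons, List.all_cons, Bool.and_eq_true, decide_eq_true_eq] at hc
    have hab : ¬ a ≤ b := not_le.mpr hc.1
    have h2 : ((b :: t).zip t).all (fun p => decide (p.2 < p.1)) = true := by
      simpa using hc.2
    rw [pvSplitPoint_cons_gt t hab, ih b h2]
    simp

-- the prefix up to the split point is strictly decreasing (adjacent-pairwise)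
theorem pvSplitPoint_take_chain : ∀ (t : List Int) (a : Int),
    ((a :: t).take (pvSplitPoint (a :: t))).IsChain (· > ·) := by
  intro t
  induction t with
  | nil => intro a; simp [pvSplitPoint_single]
  | cons b t ih =>
    intro a
    by_cases h : a ≤ b
    · simp [pvSplitPoint_cons_le t h]
    · rw [pvSplitPoint_cons_gt t h]
      have hpos := pvSplitPoint_pos t b
      obtain ⟨j, hj⟩ : ∃ j, pvSplitPoint (b :: t) = j + 1 := ⟨pvSplitPoint (b :: t) - 1, by omega⟩
      rw [hj, List.take_succ_cons]
      have hchain := ih b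
      rw [hj, List.take_succ_cons] at hchain
      apply hchain.cons
      intro y hy
      rw [List.head?_cons, Option.mem_def, Option.some.injEq] at hy
      omega

-- the three helper loops compute (adjacent comparison) && (no value in vals_seen)
theorem pvDecLoop_eq (vals : PySem.Set Int) : ∀ (t : List Int) (left : Int),
    pvDecLoop vals left t =
      (((left :: t).zip t).all (fun p => decide (p.2 < p.1)) &&
        t.all (fun x => !PySem.Set.contains vals x)) := by
  intro t
  induction t with
  | nil => intro left; rfl
  | cons x xs ih =>
    intro left
    simp only [pvDecLoop, List.zip_cons_cons, List.all_cons, ih x]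
    by_cases h1 : left ≤ x
    · simp [h1, not_lt.mpr h1]
    · by_cases h2 : x ∈ vals
      · simp [h1, h2]
      · simp [h1, h2, not_le.mp h1]

theorem pvIncLoop_eq (vals : PySem.Set Int) : ∀ (t : List Int) (left : Int),
    pvIncLoop vals left t =
      (((left :: t).zip t).all (fun p => decide (p.1 < p.2)) &&
        t.all (fun x => !PySem.Set.contains vals x)) := by
  intro t
  induction t with
  | nil => intro left; rfl
  | cons x xs ih =>
    intro left
    simp only [pvIncLoop, List.zip_cons_cons, List.all_cons, ih x]
    by_cases h1 : x ≤ left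
    · simp [h1, not_lt.mpr h1]
    · by_cases h2 : x ∈ vals
      · simp [h1, h2]
      · simp [h1, h2, not_le.mp h1]

theorem pvConstLoop_eq (vals : PySem.Set Int) : ∀ (t : List Int) (left : Int),
    pvConstLoop vals left t =
      (t.all (fun x => x == left) && t.all (fun x => !PySem.Set.contains vals x)) := by
  intro t
  induction t with
  | nil => intro left; rfl
  | cons x xs ih =>
    intro left
    simp only [pvConstLoop, List.all_cons, ih]
    by_cases h1 : left ≠ x
    · simp [h1]
      exact fun h => absurd h.symm h1
    · rw [not_ne_iff] at h1
      by_cases h2 : x ∈ vals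
      · simp [h1, h2]
      · simp [h1, h2]

-- A's loop, characterised by the split point of the remaining sequence
theorem pvDecLeftLoop_eq (seqtype : Int) : ∀ (t : List Int) (left : Int) (vals : PySem.Set Int),
    pvDecLeftLoop seqtype vals left t =
      (if pvSplitPoint (left :: t) = t.length + 1 then true
       else seq_type ((left :: t).drop (pvSplitPoint (left :: t))) seqtype
              (List.foldl PySem.Set.add vals (t.take (pvSplitPoint (left :: t) - 1)))) := by
  intro t
  induction t with
  | nil =>
    intro left vals
    simp [pvDecLeftLoop, pvSplitPoint_single]
  | cons x xs ih =>
    intro left vals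
    by_cases h : left ≤ x
    · have hsp := pvSplitPoint_cons_le xs h
      simp only [pvDecLeftLoop, h, if_true, hsp, List.length_cons]
      simp
    · have hsp := pvSplitPoint_cons_gt xs h
      have hpos := pvSplitPoint_pos xs x
      obtain ⟨j', hj⟩ : ∃ j', pvSplitPoint (x :: xs) = j' + 1 :=
        ⟨pvSplitPoint (x :: xs) - 1, by omega⟩
      simp only [pvDecLeftLoop, h, if_false, ih x (PySem.Set.add vals x), hsp, hj,
        List.length_cons]
      by_cases hend : j' + 1 = xs.length + 1
      · simp [hend]
      · have hend2 : ¬ (j' + 1 + 1 = xs.length + 1 + 1) := by omega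
        simp only [hend, if_false, hend2, if_false]
        simp [List.take_succ_cons, List.foldl_cons]

-- seq_type on a nonempty list, for each valid seqtype, as mono && not-seen
theorem seq_type_zero (a : Int) (t : List Int) (vals : PySem.Set Int) :
    seq_type (a :: t) 0 vals =
      ((((a :: t).zip t).all (fun p => decide (p.2 < p.1))) &&
        (a :: t).all (fun x => !PySem.Set.contains vals x)) := by
  rw [Bool.eq_iff_iff]
  simp [seq_type, is_decreasing, pvDecLoop_eq]
  tauto

theorem seq_type_one (a : Int) (t : List Int) (vals : PySem.Set Int) :
    seq_type (a :: t) 1 vals =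
      ((((a :: t).zip t).all (fun p => decide (p.1 < p.2))) &&
        (a :: t).all (fun x => !PySem.Set.contains vals x)) := by
  rw [Bool.eq_iff_iff]
  norm_num [seq_type, is_increasing, pvIncLoop_eq]
  tauto

theorem seq_type_two (a : Int) (t : List Int) (vals : PySem.Set Int) :
    seq_type (a :: t) 2 vals =
      (((a :: t).all (fun x => x == a)) &&
        (a :: t).all (fun x => !PySem.Set.contains vals x)) := by
  rw [Bool.eq_iff_iff]
  norm_num [seq_type, is_constant, pvConstLoop_eq]
  tauto

-- cardinality: len(set(l)) = len(l) ↔ l has no duplicates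
theorem len_ofList_eq_iff (l : List Int) :
    (PySem.Set.ofList l).length = l.length ↔ l.Nodup := by
  induction l using List.reverseRecOn with
  | nil => simp [PySem.Set.ofList_nil]
  | append_singleton xs x ih =>
    rw [PySem.Set.ofList_append_singleton, PySem.Set.add_eq_ite]
    by_cases hx : x ∈ PySem.Set.ofList xs
    · have hle := PySem.Set.length_ofList_le (xs := xs)
      rw [if_pos hx]
      rw [PySem.Set.mem_ofList] at hx
      simp only [List.length_append, List.length_cons]
      constructor
      · intro h; omega
      · intro h
        exact absurd rfl ((List.nodup_append.mp h).2.2 x hx x (List.mem_singleton_self x))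
    · rw [if_neg hx]
      rw [PySem.Set.mem_ofList] at hx
      simp only [List.length_append, List.length_cons, List.nodup_append]
      constructor
      · intro h
        refine ⟨ih.mp (by omega), List.nodup_singleton x, ?_⟩
        intro y hy z hz
        rw [List.mem_singleton] at hz
        subst hz
        exact fun he => hx (he ▸ hy)
      · rintro ⟨h1, -, -⟩
        have := ih.mpr h1
        omega

-- a zip-adjacent 'all' is a IsChain
theorem zip_all_chain' (r : Int → Int → Prop) [DecidableRel r] : ∀ (l : List Int),
    ((l.zip l.tail).all (fun p => decide (r p.1 p.2)) = true) ↔ l.IsChain r := by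
  intro l
  induction l with
  | nil => simp
  | cons a t ih =>
    cases t with
    | nil => simp
    | cons b t' =>
      rw [List.isChain_cons_cons, ← ih]
      simp only [List.zip_cons_cons, List.tail_cons, List.all_cons, Bool.and_eq_true,
        decide_eq_true_eq]

-- adding elements already present changes nothing
theorem update_of_mem (s : PySem.Set Int) : ∀ (t : List Int), (∀ x ∈ t, x ∈ s) → PySem.Set.update s t = s := by
  intro t
  induction t generalizing s with
  | nil => intro _; rfl
  | cons x xs ih =>
    intro h
    rw [PySem.Set.update_cons, PySem.Set.add_of_mem (h x (by simp))]
    exact ih s (fun y hy => h y (by simp [hy]))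

-- ===== VERDICT (by name: the statement is the Claim_ definition above) =====
theorem dec_left_spec : Claim_equal_dec_left := by
  intro cperm seqtype _ hpre
  obtain ⟨hne, hst⟩ := hpre
  unfold Spec_dec_left
  match cperm with
  | [] => exact absurd rfl hne
  | c :: rest =>
    have hlen : (c :: rest).length = rest.length + 1 := rfl
    rw [show dec_left (c :: rest) seqtype = pvDecLeftLoop seqtype (PySem.Set.ofList [c]) c rest from rfl,
      pvDecLeftLoop_eq]
    set i := pvSplitPoint (c :: rest) with hi
    have hpos := pvSplitPoint_pos rest c
    have hle := pvSplitPoint_le_len rest c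
    by_cases hend : i = rest.length + 1
    · simp only [hend, if_true]
      unfold dec_left_alt
      simp [← hi, hend, hlen]
    · have hvalid : seqtype = 0 ∨ seqtype = 1 ∨ seqtype = 2 := by
        rcases hst with h | h | h | h
        · exact Or.inl h
        · exact Or.inr (Or.inl h)
        · exact Or.inr (Or.inr h)
        · exact absurd (pvSplitPoint_of_chain rest c h) hend
      -- A's vals_seen at the break is exactly set(cperm[:i])
      have hvals : List.foldl PySem.Set.add (PySem.Set.ofList [c]) (rest.take (i - 1)) =
          PySem.Set.ofList ((c :: rest).take i) := by
        obtain ⟨i', hi'⟩ : ∃ i', i = i' + 1 := ⟨i - 1, by omega⟩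
        rw [hi', PySem.Set.ofList_eq_foldl, PySem.Set.ofList_eq_foldl]
        simp [List.take_succ_cons, List.foldl_cons]
      simp only [hend, if_false, hvals]
      -- prefix facts
      have hilt : i < (c :: rest).length := by rw [hlen]; omega
      have hpre_chain : ((c :: rest).take i).IsChain (· > ·) := by
        rw [hi]; exact pvSplitPoint_take_chain rest c
      have hpre_nodup : ((c :: rest).take i).Nodup :=
        (List.isChain_iff_pairwise.mp hpre_chain).nodup
      have hpre_len : ((c :: rest).take i).length = i := by
        rw [List.length_take]; omega
      have hpre_set : PySem.Set.ofList ((c :: rest).take i) = (c :: rest).take i :=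
        PySem.Set.ofList_eq_self_of_nodup _ hpre_nodup
      -- suffix is nonempty
      have hdrop : ∃ a t, (c :: rest).drop i = a :: t := by
        cases hd : (c :: rest).drop i with
        | nil => rw [List.drop_eq_nil_iff] at hd; omega
        | cons a t => exact ⟨a, t, rfl⟩
      obtain ⟨a, t, hat⟩ := hdrop
      have htad : (c :: rest) = (c :: rest).take i ++ a :: t := by
        rw [← hat, List.take_append_drop]
      -- membership in A's vals_seen is membership in the prefix
      have hmem : ∀ x, PySem.Set.contains (PySem.Set.ofList ((c :: rest).take i)) x = true ↔
          x ∈ (c :: rest).take i := by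
        intro x; rw [PySem.Set.contains_iff, PySem.Set.mem_ofList]
      -- global distinct count (valid when both parts are internally duplicate-free):
      -- len(set(cperm)) = n  ↔  suffix disjoint from prefix
      have hcount : ∀ (hsuf : (a :: t).Nodup),
          ((PySem.Set.ofList (c :: rest)).length = (c :: rest).length ↔
            ∀ x ∈ a :: t, x ∉ (c :: rest).take i) := by
        intro hsuf
        rw [len_ofList_eq_iff]
        constructor
        · intro h x hx hx'
          rw [htad, List.nodup_append] at h
          exact h.2.2 x hx' x hx rfl
        · intro h
          rw [htad, List.nodup_append]
          exact ⟨hpre_nodup, hsuf, fun u hu v hv he => h v hv (he ▸ hu)⟩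
      have hvne : ¬ i = (c :: rest).length := by rw [hlen]; exact hend
      -- len(set(cperm)) comparison, brought from Int to Nat
      have hlenEq : ∀ m : Nat,
          ((decide (PySem.Set.len (PySem.Set.ofList (c :: rest)) = (m : Int))) = true) ↔
            (PySem.Set.ofList (c :: rest)).length = m := by
        intro m; simp [PySem.Set.len]
      -- elementwise "not seen" as plain non-membership
      have hmem' : ∀ x, ((!PySem.Set.contains (PySem.Set.ofList ((c :: rest).take i)) x) = true) ↔
          x ∉ (c :: rest).take i := by
        intro x
        rw [Bool.not_eq_true', Bool.eq_false_iff]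
        exact not_congr (hmem x)
      have hAllIff : ((a :: t).all (fun x => !PySem.Set.contains (PySem.Set.ofList ((c :: rest).take i)) x) = true) ↔
          (∀ x ∈ a :: t, x ∉ (c :: rest).take i) := by
        simp only [List.all_eq_true, hmem']
      rcases hvalid with h0 | h1 | h2
      · -- seqtype 0: strictly decreasing suffix
        subst h0
        have hB : dec_left_alt (c :: rest) 0 =
            (((a :: t).zip t).all (fun p => decide (p.2 < p.1)) &&
              decide (PySem.Set.len (PySem.Set.ofList (c :: rest)) = (((c :: rest).length : Nat) : Int))) := by
          simp only [dec_left_alt]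
          rw [← hi, if_neg hvne, hat]
          rfl
        rw [hat, seq_type_zero, hB]
        by_cases hmono : (((a :: t)).zip t).all (fun p => decide (p.2 < p.1)) = true
        · have hsuf : (a :: t).Nodup :=
            ((List.isChain_iff_pairwise.mp ((zip_all_chain' (· > ·) (a :: t)).mp hmono))).nodup
          simp only [hmono, Bool.true_and]
          rw [Bool.eq_iff_iff]
          constructor
          · intro h; exact (hlenEq _).mpr ((hcount hsuf).mpr (hAllIff.mp h))
          · intro h; exact hAllIff.mpr ((hcount hsuf).mp ((hlenEq _).mp h))
        · simp [hmono]
      · -- seqtype 1: strictly increasing suffix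
        subst h1
        have hB : dec_left_alt (c :: rest) 1 =
            (((a :: t).zip t).all (fun p => decide (p.1 < p.2)) &&
              decide (PySem.Set.len (PySem.Set.ofList (c :: rest)) = (((c :: rest).length : Nat) : Int))) := by
          simp only [dec_left_alt]
          rw [← hi, if_neg hvne, hat]
          rfl
        rw [hat, seq_type_one, hB]
        by_cases hmono : (((a :: t)).zip t).all (fun p => decide (p.1 < p.2)) = true
        · have hsuf : (a :: t).Nodup :=
            ((List.isChain_iff_pairwise.mp ((zip_all_chain' (· < ·) (a :: t)).mp hmono))).nodup
          simp only [hmono, Bool.true_and]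
          rw [Bool.eq_iff_iff]
          constructor
          · intro h; exact (hlenEq _).mpr ((hcount hsuf).mpr (hAllIff.mp h))
          · intro h; exact hAllIff.mpr ((hcount hsuf).mp ((hlenEq _).mp h))
        · simp [hmono]
      · -- seqtype 2: constant suffix
        subst h2
        have hB : dec_left_alt (c :: rest) 2 =
            (decide (PySem.List.count (a :: t) a = (a :: t).length) &&
              decide (PySem.Set.len (PySem.Set.ofList (c :: rest)) = ((i + 1 : Nat) : Int))) := by
          simp only [dec_left_alt]
          rw [← hi, if_neg hvne, hat]
          rfl
        rw [hat, seq_type_two, hB]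
        have hcnt_iff : ((decide (PySem.List.count (a :: t) a = (a :: t).length)) = true) ↔
            ∀ b ∈ a :: t, a = b := by
          rw [decide_eq_true_iff, PySem.List.count_eq]
          exact List.count_eq_length
        have hall_iff : ((a :: t).all (fun x => x == a) = true) ↔ ∀ b ∈ a :: t, a = b := by
          simp only [List.all_eq_true, beq_iff_eq]
          exact ⟨fun h b hb => (h b hb).symm, fun h b hb => (h b hb).symm⟩
        by_cases hmono : ∀ b ∈ a :: t, a = b
        · have hset : PySem.Set.ofList (c :: rest) = PySem.Set.add ((c :: rest).take i) a := by
            conv_lhs => rw [htad]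
            rw [PySem.Set.ofList_append, hpre_set, PySem.Set.update_cons]
            apply update_of_mem
            intro x hx
            rw [PySem.Set.mem_add]
            exact Or.inr (hmono x (List.mem_cons_of_mem a hx)).symm
          have hlen2 : (PySem.Set.ofList (c :: rest)).length =
              (if a ∈ (c :: rest).take i then i else i + 1) := by
            rw [hset, PySem.Set.add_eq_ite]
            split_ifs with h
            · exact hpre_len
            · simp [hpre_len]
          have hNotInIff : (∀ x ∈ a :: t, x ∉ (c :: rest).take i) ↔ a ∉ (c :: rest).take i :=
            ⟨fun h => h a (by simp), fun h x hx => by rw [← hmono x hx]; exact h⟩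
          rw [hall_iff.mpr hmono, hcnt_iff.mpr hmono]
          simp only [Bool.true_and]
          rw [Bool.eq_iff_iff]
          constructor
          · intro h
            apply (hlenEq _).mpr
            rw [hlen2, if_neg (hNotInIff.mp (hAllIff.mp h))]
          · intro h
            apply hAllIff.mpr
            apply hNotInIff.mpr
            intro hain
            have hl := (hlenEq _).mp h
            rw [hlen2, if_pos hain] at hl
            omega
        · have h1 : (a :: t).all (fun x => x == a) = false := by
            rw [Bool.eq_false_iff]
            intro hb
            exact hmono (hall_iff.mp hb)
          have h2 : (decide (PySem.List.count (a :: t) a = (a :: t).length)) = false := by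
            rw [Bool.eq_false_iff]
            intro hb
            exact hmono (hcnt_iff.mp hb)
          rw [h1, h2]
          simp
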